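-- pv_equiv track=rewrite | github.com/wkdcjdfyd/BaekJoon_Online_Judge | solve_by_using_py/9519.py | rollback
-- ===== SOURCE A (Python) =====
-- def rollback(word):
--     front = 0
--     rear = len(word)-1
--     prev_word = [''] * len(word)
--
--     for i in range(0, len(word), 2):
--         prev_word[front] = word[i]
--         front += 1
--         if len(word) > i+1:
--             prev_word[rear] = word[i+1]
--             rear -= 1
--
--     return ''.join(prev_word)
-- ===== SOURCE B (Python) =====
-- def rollback(word):
--     evens = word[0::2]
--     odds = word[1::2]
--     return evens + odds[::-1]
-- ===== Notes on version B (the rewrite author's own statement) =====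
-- stated objective: idiomatic
-- what changed: Replaces the front/rear pointer loop writing into a preallocated buffer by two stride-2 slices (even-index chars kept in order, odd-index chars reversed) concatenated directly.
import Mathlib
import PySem

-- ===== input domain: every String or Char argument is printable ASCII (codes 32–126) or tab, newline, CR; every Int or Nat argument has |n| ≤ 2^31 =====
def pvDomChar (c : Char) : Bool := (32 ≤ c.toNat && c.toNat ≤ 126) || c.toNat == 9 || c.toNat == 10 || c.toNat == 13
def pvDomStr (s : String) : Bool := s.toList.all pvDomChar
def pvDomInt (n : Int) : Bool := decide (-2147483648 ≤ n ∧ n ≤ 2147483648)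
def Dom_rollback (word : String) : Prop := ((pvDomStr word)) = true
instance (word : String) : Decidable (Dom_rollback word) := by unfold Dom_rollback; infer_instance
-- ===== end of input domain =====

-- B replaces A's front/rear pointer loop over a preallocated buffer by two stride-2
-- slices (even-index chars in order, odd-index chars reversed) concatenated (idiomatic).


-- ===== PORT A =====
-- prev_word's cells are Python strings ('' or a single char): modelled as List Char ([] or [c]);
-- ''.join is PySem.Chars.join []. The loop body (one iteration of A's for-loop) is the helper.
def rollbackStep (cs : List Char) (n : Int) (st : Int × Int × List (List Char)) (i : Int) :
    Int × Int × List (List Char) :=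
  let prev := PySem.List.pySetD st.2.2 st.1 [PySem.List.pyGetD cs i ' ']
  let front := st.1 + 1
  if n > i + 1 then
    (front, st.2.1 - 1, PySem.List.pySetD prev st.2.1 [PySem.List.pyGetD cs (i + 1) ' '])
  else
    (front, st.2.1, prev)

def rollback (word : String) : String :=
  let cs := word.toList
  let n : Int := PySem.Str.len word
  let st := (PySem.List.pyRange 0 n 2).foldl (rollbackStep cs n)
    (0, n - 1, List.replicate cs.length ([] : List Char))
  String.ofList (PySem.Chars.join [] st.2.2)

-- ===== PORT B =====
def rollback_alt (word : String) : String :=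
  let evens := (PySem.List.slice? word.toList (some 0) none 2).getD []
  let odds := (PySem.List.slice? word.toList (some 1) none 2).getD []
  let revOdds := (PySem.List.slice? odds none none (-1)).getD []
  String.ofList (evens ++ revOdds)

-- ===== PRECONDITION & SPEC =====
def Spec_rollback (word : String) (out : String) : Prop := out = rollback_alt word
instance (word : String) (out : String) : Decidable (Spec_rollback word out) := by unfold Spec_rollback; infer_instance

-- ===== CLAIM (what is proved, stated in full; the proofs are below) =====
def Claim_equal_rollback : Prop := ∀ (word : String), Dom_rollback word → Spec_rollback word (rollback word)

-- ===== LEMMAS AND PROOFS =====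

/-- Characters of a list at even indices, in order. -/
def pvEvens {α : Type} : List α → List α
  | [] => []
  | [a] => [a]
  | a :: _ :: t => a :: pvEvens t

/-- Characters of a list at odd indices, in order. -/
def pvOdds {α : Type} : List α → List α
  | [] => []
  | [_] => []
  | _ :: b :: t => b :: pvOdds t

theorem pvEvens_length {α : Type} : ∀ (cs : List α), (pvEvens cs).length = (cs.length + 1) / 2
  | [] => by simp [pvEvens]
  | [_] => by simp [pvEvens]
  | _ :: _ :: t => by simp [pvEvens, pvEvens_length t]; omega

theorem pvOdds_length {α : Type} : ∀ (cs : List α), (pvOdds cs).length = cs.length / 2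
  | [] => by simp [pvOdds]
  | [_] => by simp [pvOdds]
  | _ :: _ :: t => by simp [pvOdds, pvOdds_length t]; omega

theorem pvEvens_getElem {α : Type} : ∀ (cs : List α) (k : Nat) (h : 2 * k < cs.length)
    (h' : k < (pvEvens cs).length), (pvEvens cs)[k] = cs[2 * k]
  | [], _, h, _ => by simp at h
  | [a], k, h, _ => by
      have : k = 0 := by simp at h; omega
      subst this; rfl
  | a :: b :: t, 0, h, _ => rfl
  | a :: b :: t, (k + 1), h, h' => by
      have hm : 2 * (k + 1) = 2 * k + 1 + 1 := by omega
      simp only [pvEvens, List.getElem_cons_succ, hm]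
      exact pvEvens_getElem t k (by simp at h; omega) (by simp [pvEvens] at h'; omega)

theorem pvOdds_getElem {α : Type} : ∀ (cs : List α) (k : Nat) (h : 2 * k + 1 < cs.length)
    (h' : k < (pvOdds cs).length), (pvOdds cs)[k] = cs[2 * k + 1]
  | [], _, h, _ => by simp at h
  | [_], k, h, _ => by simp at h
  | a :: b :: t, 0, h, _ => rfl
  | a :: b :: t, (k + 1), h, h' => by
      have hm : 2 * (k + 1) = 2 * k + 1 + 1 := by omega
      simp only [pvOdds, List.getElem_cons_succ, hm]
      exact pvOdds_getElem t k (by simp at h; omega) (by simp [pvOdds] at h'; omega)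

-- B side: the stride-2 slices are exactly pvEvens / pvOdds.

theorem filt_evens {α : Type} : ∀ (cs : List α),
    (List.range ((cs.length + 1) / 2)).filterMap (fun k => cs[2 * k]?) = pvEvens cs
  | [] => by simp [pvEvens]
  | [a] => by simp [pvEvens]
  | a :: b :: t => by
      have h2 : ((a :: b :: t).length + 1) / 2 = (t.length + 1) / 2 + 1 := by simp; omega
      rw [h2, List.range_succ_eq_map]
      simp only [List.filterMap_cons, List.filterMap_map, Nat.mul_zero,
        List.getElem?_cons_zero, Function.comp]
      have : ∀ k : Nat, (a :: b :: t)[2 * (k + 1)]? = t[2 * k]? := by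
        intro k
        have : 2 * (k + 1) = 2 * k + 1 + 1 := by omega
        simp [this]
      simp only [this, pvEvens]
      rw [filt_evens t]

theorem filt_odds {α : Type} : ∀ (cs : List α),
    (List.range (cs.length / 2)).filterMap (fun k => cs[2 * k + 1]?) = pvOdds cs
  | [] => by simp [pvOdds]
  | [a] => by simp [pvOdds]
  | a :: b :: t => by
      have h2 : (a :: b :: t).length / 2 = t.length / 2 + 1 := by simp; omega
      rw [h2, List.range_succ_eq_map]
      simp only [List.filterMap_cons, List.filterMap_map, Nat.mul_zero, Function.comp]
      have : ∀ k : Nat, (a :: b :: t)[2 * (k + 1) + 1]? = t[2 * k + 1]? := by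
        intro k
        have : 2 * (k + 1) + 1 = 2 * k + 1 + 1 + 1 := by omega
        simp [this]
      simp only [this, pvOdds, Nat.zero_add, List.getElem?_cons_succ, List.getElem?_cons_zero]
      rw [filt_odds t]

theorem slice?_even (cs : List Char) :
    PySem.List.slice? cs (some 0) none 2 = some (pvEvens cs) := by
  rw [← filt_evens cs]
  unfold PySem.List.slice? PySem.List.sliceIndices
  norm_num
  have hcount : (if 0 < cs.length then (((cs.length : Int) + 2 - 1) / 2).toNat else 0)
      = (cs.length + 1) / 2 := by
    split_ifs with h <;> omega
  have hf : ∀ x : Nat, (2 * (x : Int)).toNat = 2 * x := by intro x; omega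
  rw [hcount]
  simp only [hf]

theorem slice?_odd (cs : List Char) :
    PySem.List.slice? cs (some 1) none 2 = some (pvOdds cs) := by
  rw [← filt_odds cs]
  unfold PySem.List.slice? PySem.List.sliceIndices
  norm_num
  rcases Nat.eq_zero_or_pos cs.length with h | h
  · simp [h]
  · have hmin : min 1 (cs.length : Int) = 1 := by omega
    rw [hmin]
    have hcount : (if 1 < cs.length then (((cs.length : Int) - 1 + 2 - 1) / 2).toNat else 0)
        = cs.length / 2 := by
      split_ifs with h2 <;> omega
    have hf : ∀ x : Nat, (1 + 2 * (x : Int)).toNat = 2 * x + 1 := by intro x; omega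
    rw [hcount]
    simp only [hf]

theorem rollback_alt_closed (word : String) :
    rollback_alt word = String.ofList (pvEvens word.toList ++ (pvOdds word.toList).reverse) := by
  simp [rollback_alt, slice?_even, slice?_odd, PySem.List.slice?_none_none_neg_one]

-- A side: writing at the first empty slot of the middle gap
theorem set_first_mid (E R : List (List Char)) (t p : Nat) (v : List Char) (ht : 0 < t)
    (hp : p = E.length) :
    (E ++ (List.replicate t ([] : List Char) ++ R)).set p v
      = E ++ (v :: (List.replicate (t - 1) [] ++ R)) := by
  subst hp
  rw [List.set_append]
  cases t with
  | zero => omega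
  | succ t' => simp [List.replicate_succ]

-- writing at the last empty slot of the middle gap
theorem set_last_mid (E R : List (List Char)) (t p : Nat) (v : List Char)
    (hp : p = E.length + t) :
    (E ++ (List.replicate (t + 1) ([] : List Char) ++ R)).set p v
      = E ++ (List.replicate t [] ++ (v :: R)) := by
  subst hp
  rw [List.set_append]
  simp only [Nat.add_sub_cancel_left]
  rw [if_neg (by omega), List.set_append, if_pos (by simp)]
  rw [List.replicate_succ', List.set_append, if_neg (by simp), List.length_replicate]
  simp

-- The loop invariant of A: after k iterations the first k even-index characters sit at the
-- front in order, the first k odd-index characters at the back reversed, '' in between.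
theorem loopA (cs : List Char) : ∀ (k : Nat), k ≤ (cs.length + 1) / 2 →
    (List.range k).foldl (fun st (j : Nat) => rollbackStep cs (cs.length : Int) st (2 * (j : Int)))
        (0, (cs.length : Int) - 1, List.replicate cs.length ([] : List Char))
      = ((k : Int), (cs.length : Int) - 1 - (min k (cs.length / 2) : Nat),
         ((pvEvens cs).take k).map (fun c => [c])
           ++ (List.replicate (cs.length - k - min k (cs.length / 2)) []
           ++ (((pvOdds cs).take k).map (fun c => [c])).reverse)) := by
  intro k
  induction k with
  | zero => intro _; simp
  | succ k ih =>
      intro hk1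
      have hk : k < (cs.length + 1) / 2 := by omega
      have h2k : 2 * k < cs.length := by omega
      have hEl : (pvEvens cs).length = (cs.length + 1) / 2 := pvEvens_length cs
      have hOl : (pvOdds cs).length = cs.length / 2 := pvOdds_length cs
      rw [List.range_succ, List.foldl_append, ih (by omega)]
      simp only [List.foldl_cons, List.foldl_nil]
      unfold rollbackStep
      have hget : PySem.List.pyGetD cs (2 * (k : Int)) ' ' = cs[2 * k] := by
        have : (2 * (k : Int)) = ((2 * k : Nat) : Int) := by push_cast; ring
        rw [this, PySem.List.pyGetD_natCast, List.getD_eq_getElem cs ' ' h2k]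
      have hsetF : PySem.List.pySetD
          (((pvEvens cs).take k).map (fun c => [c])
            ++ (List.replicate (cs.length - k - min k (cs.length / 2)) []
            ++ (((pvOdds cs).take k).map (fun c => [c])).reverse)) (k : Int) [cs[2 * k]]
          = ((pvEvens cs).take (k + 1)).map (fun c => [c])
            ++ (List.replicate (cs.length - k - min k (cs.length / 2) - 1) []
            ++ (((pvOdds cs).take k).map (fun c => [c])).reverse) := by
        rw [PySem.List.pySetD_natCast]
        have hlenE : (((pvEvens cs).take k).map (fun c => ([c] : List Char))).length = k := by
          simp; omega
        rw [set_first_mid _ _ _ k _ (by omega) hlenE.symm]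
        rw [List.take_succ, List.getElem?_eq_getElem (by omega), pvEvens_getElem cs k h2k (by omega)]
        simp
      simp only [hget, hsetF]
      by_cases hcond : (2 * (k : Int) + 1) < (cs.length : Int)
      · -- odd-index write happens
        have hkq : k < cs.length / 2 := by omega
        have hmin1 : min (k + 1) (cs.length / 2) = k + 1 := by omega
        rw [if_pos (by omega)]
        have hget2 : PySem.List.pyGetD cs (2 * (k : Int) + 1) ' ' = cs[2 * k + 1] := by
          have : (2 * (k : Int) + 1) = ((2 * k + 1 : Nat) : Int) := by push_cast; ring
          rw [this, PySem.List.pyGetD_natCast, List.getD_eq_getElem cs ' ' (by omega)]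
        have hrear : (cs.length : Int) - 1 - (min k (cs.length / 2) : Nat)
            = ((cs.length - 1 - k : Nat) : Int) := by omega
        rw [hget2, hrear, PySem.List.pySetD_natCast]
        have hlenE1 : (((pvEvens cs).take (k + 1)).map (fun c => ([c] : List Char))).length
            = k + 1 := by simp; omega
        have hcnt : cs.length - k - min k (cs.length / 2) - 1 = (cs.length - 2 * k - 2) + 1 := by
          omega
        rw [hcnt, set_last_mid _ _ _ (cs.length - 1 - k) _ (by rw [hlenE1]; omega)]
        have hodds : ([cs[2 * k + 1]] : List Char) :: (((pvOdds cs).take k).map (fun c => [c])).reverse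
            = (((pvOdds cs).take (k + 1)).map (fun c => ([c] : List Char))).reverse := by
          rw [List.take_succ, List.getElem?_eq_getElem (by omega),
            pvOdds_getElem cs k (by omega) (by omega)]
          simp
        rw [hodds]
        refine Prod.ext (by push_cast; ring) (Prod.ext (by simp; omega) ?_)
        simp only [hmin1]
        have : cs.length - 2 * k - 2 = cs.length - (k + 1) - (k + 1) := by omega
        rw [this]
      · -- no odd index left
        have hkq : cs.length / 2 ≤ k := by omega
        have hmin : min k (cs.length / 2) = cs.length / 2 := by omega
        have hmin1 : min (k + 1) (cs.length / 2) = cs.length / 2 := by omega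
        rw [if_neg (by omega)]
        have htake : (pvOdds cs).take (k + 1) = (pvOdds cs).take k := by
          rw [List.take_of_length_le (by omega), List.take_of_length_le (by omega)]
        refine Prod.ext (by push_cast; ring) (Prod.ext (by simp [hmin, hmin1]) ?_)
        simp only [htake, hmin, hmin1]
        have : cs.length - k - cs.length / 2 - 1 = cs.length - (k + 1) - cs.length / 2 := by omega
        rw [this]

theorem join_nil_flatten : ∀ (xs : List (List Char)), PySem.Chars.join [] xs = xs.flatten
  | [] => by simp [PySem.Chars.join, List.intercalate]
  | [p] => by simp [PySem.Chars.join, List.intercalate]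
  | p :: q :: rest => by
      rw [PySem.Chars.join_cons_cons, join_nil_flatten (q :: rest)]
      simp

theorem rollback_closed (word : String) :
    rollback word = String.ofList (pvEvens word.toList ++ (pvOdds word.toList).reverse) := by
  unfold rollback
  have hn : PySem.Str.len word = (word.toList.length : Int) := by
    simp [pysem]
  simp only []
  rw [hn, PySem.List.pyRange_of_pos 0 (word.toList.length : Int) (by norm_num), List.foldl_map]
  have hcnt : (if (0 : Int) < (word.toList.length : Int)
        then (((word.toList.length : Int) - 0 + 2 - 1) / 2).toNat else 0)
      = (word.toList.length + 1) / 2 := by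
    split_ifs with h <;> omega
  rw [hcnt]
  have : (fun (st : Int × Int × List (List Char)) (b : Nat) =>
        rollbackStep word.toList (word.toList.length : Int) st (0 + 2 * (b : Int)))
      = (fun st (j : Nat) => rollbackStep word.toList (word.toList.length : Int) st (2 * (j : Int))) := by
    funext st b; rw [zero_add]
  rw [this, loopA word.toList _ le_rfl]
  have hEl := pvEvens_length word.toList
  have hOl := pvOdds_length word.toList
  have hminq : min ((word.toList.length + 1) / 2) (word.toList.length / 2) = word.toList.length / 2 := by
    omega
  have hz : word.toList.length - (word.toList.length + 1) / 2 - word.toList.length / 2 = 0 := by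
    omega
  simp only [hminq, hz, List.replicate_zero, List.nil_append,
    List.take_of_length_le (le_of_eq hEl),
    List.take_of_length_le (by omega : (pvOdds word.toList).length ≤ (word.toList.length + 1) / 2)]
  rw [join_nil_flatten]
  simp only [List.flatten_append]
  rw [← List.map_reverse, ← join_nil_flatten, ← join_nil_flatten,
    PySem.Chars.join_nil_singletons, PySem.Chars.join_nil_singletons]

-- ===== VERDICT (by name: the statement is the Claim_ definition above) =====
theorem rollback_spec : Claim_equal_rollback := by
  intro word _
  unfold Spec_rollback
  rw [rollback_closed, rollback_alt_closed]
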